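-- pv_equiv track=rewrite | github.com/adkinsrs/AdventOfCode2015 | 12_5.py | sandwiched_letter_present
-- ===== SOURCE A (Python) =====
-- def sandwiched_letter_present(string):
-- 	''' Nice strings must a letter sandwiched by 2 letters '''
-- 	for i in range(len(string)):
-- 		sandwich = string[i]
-- 		try:
-- 			if string[i+2] == sandwich:
-- 				return True
-- 		except IndexError:
-- 			continue
-- 	return False
-- ===== SOURCE B (Python) =====
-- def sandwiched_letter_present(string):
-- 	''' Nice strings must a letter sandwiched by 2 letters '''
-- 	# Characters two apart share index parity, so reduce the problem to
-- 	# finding an adjacent repeat inside each stride-2 slice of the string.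
-- 	return _has_adjacent_repeat(string[::2]) or _has_adjacent_repeat(string[1::2])
--
-- def _has_adjacent_repeat(chunk):
-- 	prev = None
-- 	for ch in chunk:
-- 		if ch == prev:
-- 			return True
-- 		prev = ch
-- 	return False
-- ===== Notes on version B (the rewrite author's own statement) =====
-- stated objective: alternative
-- what changed: B splits the string into its even- and odd-index subsequences (stride-2 slices) and checks each for an adjacent repeated character, instead of A's index loop comparing string[i] with string[i+2] under try/except.
import Mathlib
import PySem

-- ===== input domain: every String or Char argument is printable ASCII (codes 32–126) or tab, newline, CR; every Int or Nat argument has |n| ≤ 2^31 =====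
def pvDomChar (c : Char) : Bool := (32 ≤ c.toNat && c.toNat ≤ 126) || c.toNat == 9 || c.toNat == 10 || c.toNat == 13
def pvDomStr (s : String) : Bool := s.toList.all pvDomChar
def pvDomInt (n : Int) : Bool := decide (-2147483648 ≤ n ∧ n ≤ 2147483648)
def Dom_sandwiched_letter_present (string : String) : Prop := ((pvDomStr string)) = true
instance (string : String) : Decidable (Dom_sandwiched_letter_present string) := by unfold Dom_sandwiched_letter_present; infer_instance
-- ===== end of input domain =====

-- B splits the string into its even- and odd-index stride-2 slices and scans each for an adjacent repeat (alternative decomposition, same cost).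


-- ===== PORT A =====
-- for i in range(len(string)): sandwich = string[i]; if string[i+2] == sandwich: return True (IndexError → continue); return False
def sandwiched_letter_present (string : String) : Bool :=
  let cs := string.toList
  (List.range cs.length).any (fun i =>
    match PySem.List.pyGet? cs ((i : Int) + 2), PySem.List.pyGet? cs (i : Int) with
    | some c2, some sandwich => c2 == sandwich
    | _, _ => false)

-- ===== PORT B =====
-- _has_adjacent_repeat: prev = None; for ch in chunk: if ch == prev: return True; prev = ch; return False
def pvHasAdjAux (prev : Option Char) : List Char → Bool
  | [] => false
  | ch :: rest => if (some ch == prev) then true else pvHasAdjAux (some ch) rest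

-- _has_adjacent_repeat(string[::2]) or _has_adjacent_repeat(string[1::2])
def sandwiched_letter_present_alt (string : String) : Bool :=
  let cs := string.toList
  pvHasAdjAux none ((PySem.List.slice? cs none none 2).getD []) ||
  pvHasAdjAux none ((PySem.List.slice? cs (some 1) none 2).getD [])

-- ===== PRECONDITION & SPEC =====
def Spec_sandwiched_letter_present (string : String) (out : Bool) : Prop := out = sandwiched_letter_present_alt string
instance (string : String) (out : Bool) : Decidable (Spec_sandwiched_letter_present string out) := by unfold Spec_sandwiched_letter_present; infer_instance

-- ===== CLAIM (what is proved, stated in full; the proofs are below) =====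
def Claim_equal_sandwiched_letter_present : Prop := ∀ (string : String), Dom_sandwiched_letter_present string → Spec_sandwiched_letter_present string (sandwiched_letter_present string)

-- ===== LEMMAS AND PROOFS =====

-- proof-only model of a stride-2 slice
def everyOther : List Char → List Char
  | [] => []
  | [a] => [a]
  | a :: _ :: rest => a :: everyOther rest

theorem length_everyOther (l : List Char) : (everyOther l).length = (l.length + 1) / 2 := by
  induction l using everyOther.induct with
  | case1 => simp [everyOther]
  | case2 a => simp [everyOther]
  | case3 a b rest ih => simp [everyOther, ih]; omega

theorem getElem?_everyOther (l : List Char) : ∀ k, (everyOther l)[k]? = l[2 * k]? := by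
  induction l using everyOther.induct with
  | case1 => simp [everyOther]
  | case2 a => intro k; cases k with
    | zero => simp [everyOther]
    | succ m => simp [everyOther]
  | case3 a b rest ih =>
    intro k
    cases k with
    | zero => simp [everyOther]
    | succ m =>
      have h2 : 2 * (m + 1) = 2 * m + 1 + 1 := by omega
      simp [everyOther, h2, ih m]

theorem filterMap_everyOther (l : List Char) :
    List.filterMap (fun k => l[2 * k]?) (List.range ((l.length + 1) / 2)) = everyOther l := by
  induction l using everyOther.induct with
  | case1 => simp [everyOther]
  | case2 a => simp [everyOther, List.range_succ]
  | case3 a b rest ih =>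
    have hc : ((a :: b :: rest).length + 1) / 2 = (rest.length + 1) / 2 + 1 := by
      simp; omega
    rw [hc, List.range_succ_eq_map]
    simp only [List.filterMap_cons, List.filterMap_map]
    have h0 : (a :: b :: rest)[2 * 0]? = some a := by simp
    have hf : (fun k => (a :: b :: rest)[2 * k]?) ∘ (· + 1) = fun k => rest[2 * k]? := by
      funext k
      have : 2 * (k + 1) = 2 * k + 1 + 1 := by omega
      simp [Function.comp, this]
    rw [h0, hf, ih]
    rfl

theorem slice2_evens (cs : List Char) :
    PySem.List.slice? cs none none 2 = some (everyOther cs) := by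
  rw [← filterMap_everyOther]
  simp only [PySem.List.slice?, PySem.List.sliceIndices]
  norm_num
  refine congrArg₂ List.filterMap ?_ (congrArg List.range ?_)
  · funext x
    congr 1
  · split <;> omega

theorem slice2_odds (cs : List Char) :
    PySem.List.slice? cs (some 1) none 2 = some (everyOther (cs.drop 1)) := by
  rw [← filterMap_everyOther]
  simp only [PySem.List.slice?, PySem.List.sliceIndices]
  norm_num
  cases cs with
  | nil => simp
  | cons a rest =>
    have hmin : min (1:Int) ((a :: rest).length : Int) = 1 := by
      simp
    rw [hmin]
    refine congrArg₂ List.filterMap ?_ (congrArg List.range ?_)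
    · funext x
      congr 1
      omega
    · simp only [List.length_cons]
      split <;> omega

theorem hasAdjAux_iff (l : List Char) : ∀ (p : Option Char),
    pvHasAdjAux p l = true ↔
      ((∃ c, l[0]? = some c ∧ p = some c) ∨ (∃ k, k + 1 < l.length ∧ l[k]? = l[k + 1]?)) := by
  induction l with
  | nil => intro p; simp [pvHasAdjAux]
  | cons ch rest ih =>
    intro p
    simp only [pvHasAdjAux]
    by_cases h : some ch = p
    · subst h
      simp only [beq_self_eq_true, if_true]
      constructor
      · intro _
        exact Or.inl ⟨ch, by simp, rfl⟩
      · intro _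
        trivial
    · rw [if_neg (by simpa using h), ih (some ch)]
      constructor
      · rintro (⟨c, hc, hpc⟩ | ⟨k, hk, he⟩)
        · obtain ⟨hlt, _⟩ := List.getElem?_eq_some_iff.mp hc
          refine Or.inr ⟨0, by simp; omega, ?_⟩
          simp only [List.getElem?_cons_zero, List.getElem?_cons_succ]
          rw [hc]
          exact hpc
        · refine Or.inr ⟨k + 1, by simp at hk ⊢; omega, ?_⟩
          simpa using he
      · rintro (⟨c, hc, hpc⟩ | ⟨k, hk, he⟩)
        · simp only [List.getElem?_cons_zero, Option.some.injEq] at hc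
          subst hc
          exact absurd hpc.symm h
        · cases k with
          | zero =>
            simp only [List.getElem?_cons_zero, List.getElem?_cons_succ] at he
            exact Or.inl ⟨ch, he.symm, rfl⟩
          | succ m =>
            simp only [List.getElem?_cons_succ] at he
            refine Or.inr ⟨m, ?_, he⟩
            simp at hk
            omega

theorem adj_iff (l : List Char) :
    pvHasAdjAux none l = true ↔ ∃ k, k + 1 < l.length ∧ l[k]? = l[k + 1]? := by
  rw [hasAdjAux_iff]
  simp

theorem A_iff (cs : List Char) :
    ((List.range cs.length).any (fun i =>
      match PySem.List.pyGet? cs ((i : Int) + 2), PySem.List.pyGet? cs (i : Int) with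
      | some c2, some sandwich => c2 == sandwich
      | _, _ => false)) = true
    ↔ ∃ i, i + 2 < cs.length ∧ cs[i]? = cs[i + 2]? := by
  simp only [List.any_eq_true, List.mem_range]
  constructor
  · rintro ⟨i, hi, h⟩
    have hcast : ((i : Int) + 2) = ((i + 2 : Nat) : Int) := by push_cast; ring
    rw [hcast, PySem.List.pyGet?_natCast, PySem.List.pyGet?_natCast] at h
    by_cases h2 : i + 2 < cs.length
    · rw [List.getElem?_eq_getElem h2, List.getElem?_eq_getElem hi] at h
      simp only [beq_iff_eq] at h
      exact ⟨i, h2, by rw [List.getElem?_eq_getElem h2, List.getElem?_eq_getElem hi, h]⟩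
    · rw [List.getElem?_eq_none (by omega)] at h
      simp at h
  · rintro ⟨i, hi, he⟩
    refine ⟨i, by omega, ?_⟩
    have hcast : ((i : Int) + 2) = ((i + 2 : Nat) : Int) := by push_cast; ring
    rw [hcast, PySem.List.pyGet?_natCast, PySem.List.pyGet?_natCast]
    rw [List.getElem?_eq_getElem (by omega : i < cs.length), List.getElem?_eq_getElem hi] at he
    rw [List.getElem?_eq_getElem hi, List.getElem?_eq_getElem (by omega : i < cs.length)]
    simp only [Option.some.injEq] at he
    simp [he]

-- ===== VERDICT (by name: the statement is the Claim_ definition above) =====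
theorem sandwiched_letter_present_spec : Claim_equal_sandwiched_letter_present := by
  intro s _
  unfold Spec_sandwiched_letter_present sandwiched_letter_present sandwiched_letter_present_alt
  show ((List.range s.toList.length).any fun i =>
      match PySem.List.pyGet? s.toList ((i : Int) + 2), PySem.List.pyGet? s.toList (i : Int) with
      | some c2, some sandwich => c2 == sandwich
      | _, _ => false)
    = (pvHasAdjAux none ((PySem.List.slice? s.toList none none 2).getD []) ||
       pvHasAdjAux none ((PySem.List.slice? s.toList (some 1) none 2).getD []))
  generalize s.toList = cs
  rw [slice2_evens, slice2_odds]
  simp only [Option.getD_some]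
  rw [Bool.eq_iff_iff, Bool.or_eq_true, A_iff, adj_iff, adj_iff]
  constructor
  · rintro ⟨i, hi, he⟩
    obtain ⟨k, hk | hk⟩ := Nat.even_or_odd' i
    · left
      refine ⟨k, ?_, ?_⟩
      · rw [length_everyOther]; omega
      · rw [getElem?_everyOther, getElem?_everyOther]
        have h1 : 2 * k = i := by omega
        have h2 : 2 * (k + 1) = i + 2 := by omega
        rw [h1, h2]; exact he
    · right
      refine ⟨k, ?_, ?_⟩
      · rw [length_everyOther]; simp; omega
      · rw [getElem?_everyOther, getElem?_everyOther]
        rw [List.getElem?_drop, List.getElem?_drop]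
        have h1 : 1 + 2 * k = i := by omega
        have h2 : 1 + 2 * (k + 1) = i + 2 := by omega
        rw [h1, h2]; exact he
  · rintro (⟨k, hk, he⟩ | ⟨k, hk, he⟩)
    · rw [length_everyOther] at hk
      rw [getElem?_everyOther, getElem?_everyOther] at he
      refine ⟨2 * k, by omega, ?_⟩
      have : 2 * (k + 1) = 2 * k + 2 := by omega
      rw [this] at he; exact he
    · rw [length_everyOther] at hk
      simp at hk
      rw [getElem?_everyOther, getElem?_everyOther, List.getElem?_drop, List.getElem?_drop] at he
      refine ⟨2 * k + 1, by omega, ?_⟩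
      have h1 : 1 + 2 * k = 2 * k + 1 := by omega
      have h2 : 1 + 2 * (k + 1) = 2 * k + 1 + 2 := by omega
      rw [h1, h2] at he; exact he
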